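-- pv_equiv track=rewrite | github.com/Galileo-Galilei/kedro-mlflow | kedro_mlflow/framework/hooks/pipeline_hook.py | _generate_kedro_command
-- ===== SOURCE A (Python) =====
-- def _generate_kedro_command(
--     tags, node_names, from_nodes, to_nodes, from_inputs, load_versions, pipeline_name
-- ):
--     cmd_list = ["kedro", "run"]
--     SEP = "="
--     if from_inputs:
--         cmd_list.append("--from-inputs" + SEP + ",".join(from_inputs))
--     if from_nodes:
--         cmd_list.append("--from-nodes" + SEP + ",".join(from_nodes))
--     if to_nodes:
--         cmd_list.append("--to-nodes" + SEP + ",".join(to_nodes))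
--     if node_names:
--         cmd_list.append("--node" + SEP + ",".join(node_names))
--     if pipeline_name:
--         cmd_list.append("--pipeline" + SEP + pipeline_name)
--     if tags:
--         # "tag" is the name of the command, "tags" the value in run_params
--         cmd_list.append("--tag" + SEP + ",".join(tags))
--     if load_versions:
--         # "load_version" is the name of the command, "load_versions" the value in run_params
--         formatted_versions = [f"{k}:{v}" for k, v in load_versions.items()]
--         cmd_list.append("--load-version" + SEP + ",".join(formatted_versions))
--
--     kedro_cmd = " ".join(cmd_list)
--     return kedro_cmd
-- ===== SOURCE B (Python) =====
-- def _generate_kedro_command(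
--     tags, node_names, from_nodes, to_nodes, from_inputs, load_versions, pipeline_name
-- ):
--     def render(specs):
--         # build the options suffix back-to-front by recursion over the spec list
--         if not specs:
--             return ""
--         flag, items = specs[0]
--         rest = render(specs[1:])
--         if items:
--             return " --" + flag + "=" + ",".join(items) + rest
--         return rest
--
--     return "kedro run" + render([
--         ("from-inputs", from_inputs),
--         ("from-nodes", from_nodes),
--         ("to-nodes", to_nodes),
--         ("node", node_names),
--         ("pipeline", [pipeline_name] if pipeline_name else []),
--         ("tag", tags),
--         ("load-version", ["%s:%s" % kv for kv in load_versions.items()]),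
--     ])
-- ===== Notes on version B (the rewrite author's own statement) =====
-- stated objective: alternative
-- what changed: B replaces A's list-of-tokens-plus-' '.join construction with a recursive helper that builds the options suffix back-to-front by direct string concatenation over a uniform (flag, items) spec list, with pipeline_name normalised to a one-element list and the space separator emitted by the recursion rather than by join.
import Mathlib
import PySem

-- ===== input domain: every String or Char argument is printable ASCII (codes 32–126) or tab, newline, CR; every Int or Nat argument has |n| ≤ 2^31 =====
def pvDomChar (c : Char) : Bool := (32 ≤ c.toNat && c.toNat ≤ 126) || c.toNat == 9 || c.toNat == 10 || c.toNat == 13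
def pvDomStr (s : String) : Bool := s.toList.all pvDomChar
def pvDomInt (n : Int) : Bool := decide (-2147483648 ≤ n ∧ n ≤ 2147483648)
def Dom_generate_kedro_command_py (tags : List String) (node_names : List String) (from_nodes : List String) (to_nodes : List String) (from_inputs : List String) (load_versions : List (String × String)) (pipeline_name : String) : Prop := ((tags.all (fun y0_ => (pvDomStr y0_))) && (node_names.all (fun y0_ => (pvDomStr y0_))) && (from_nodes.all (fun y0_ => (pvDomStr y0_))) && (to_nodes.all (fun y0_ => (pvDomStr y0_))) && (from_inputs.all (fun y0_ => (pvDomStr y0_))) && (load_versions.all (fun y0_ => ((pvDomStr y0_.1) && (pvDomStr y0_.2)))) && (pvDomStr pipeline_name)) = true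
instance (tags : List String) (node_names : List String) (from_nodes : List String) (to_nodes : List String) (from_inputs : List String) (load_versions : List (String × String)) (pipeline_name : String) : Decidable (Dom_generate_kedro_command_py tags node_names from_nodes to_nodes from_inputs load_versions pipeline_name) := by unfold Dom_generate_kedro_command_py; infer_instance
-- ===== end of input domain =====

-- B builds the command string directly by back-to-front recursion over a spec list
-- (no token list, no " ".join), normalising every option to a (flag, items) pair
-- (objective: alternative decomposition).

-- ===== PORT A =====
def generate_kedro_command_py (tags : List String) (node_names : List String) (from_nodes : List String) (to_nodes : List String) (from_inputs : List String) (load_versions : List (String × String)) (pipeline_name : String) : String :=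
  let cmd_list : List String := ["kedro", "run"]
  let SEP := "="
  let cmd_list := if !from_inputs.isEmpty then cmd_list ++ ["--from-inputs" ++ SEP ++ PySem.Str.join "," from_inputs] else cmd_list
  let cmd_list := if !from_nodes.isEmpty then cmd_list ++ ["--from-nodes" ++ SEP ++ PySem.Str.join "," from_nodes] else cmd_list
  let cmd_list := if !to_nodes.isEmpty then cmd_list ++ ["--to-nodes" ++ SEP ++ PySem.Str.join "," to_nodes] else cmd_list
  let cmd_list := if !node_names.isEmpty then cmd_list ++ ["--node" ++ SEP ++ PySem.Str.join "," node_names] else cmd_list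
  let cmd_list := if !pipeline_name.isEmpty then cmd_list ++ ["--pipeline" ++ SEP ++ pipeline_name] else cmd_list
  let cmd_list := if !tags.isEmpty then cmd_list ++ ["--tag" ++ SEP ++ PySem.Str.join "," tags] else cmd_list
  let cmd_list := if !load_versions.isEmpty then
      let formatted_versions := load_versions.map (fun kv => kv.1 ++ ":" ++ kv.2)
      cmd_list ++ ["--load-version" ++ SEP ++ PySem.Str.join "," formatted_versions]
    else cmd_list
  PySem.Str.join " " cmd_list

-- ===== PORT B =====
-- recursive helper of B: renders the options suffix back-to-front
def pvRenderOpts : List (String × List String) → String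
  | [] => ""
  | (flag, items) :: rest =>
      let tail := pvRenderOpts rest
      if !items.isEmpty then " --" ++ flag ++ "=" ++ PySem.Str.join "," items ++ tail
      else tail

def generate_kedro_command_py_alt (tags : List String) (node_names : List String) (from_nodes : List String) (to_nodes : List String) (from_inputs : List String) (load_versions : List (String × String)) (pipeline_name : String) : String :=
  "kedro run" ++ pvRenderOpts [
    ("from-inputs", from_inputs),
    ("from-nodes", from_nodes),
    ("to-nodes", to_nodes),
    ("node", node_names),
    ("pipeline", if !pipeline_name.isEmpty then [pipeline_name] else []),
    ("tag", tags),
    ("load-version", load_versions.map (fun kv => kv.1 ++ ":" ++ kv.2))]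

-- ===== PRECONDITION & SPEC =====
def Spec_generate_kedro_command_py (tags : List String) (node_names : List String) (from_nodes : List String) (to_nodes : List String) (from_inputs : List String) (load_versions : List (String × String)) (pipeline_name : String) (out : String) : Prop := out = generate_kedro_command_py_alt tags node_names from_nodes to_nodes from_inputs load_versions pipeline_name
instance (tags : List String) (node_names : List String) (from_nodes : List String) (to_nodes : List String) (from_inputs : List String) (load_versions : List (String × String)) (pipeline_name : String) (out : String) : Decidable (Spec_generate_kedro_command_py tags node_names from_nodes to_nodes from_inputs load_versions pipeline_name out) := by unfold Spec_generate_kedro_command_py; infer_instance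

-- ===== CLAIM =====
def Claim_equal_generate_kedro_command_py : Prop := ∀ (tags : List String) (node_names : List String) (from_nodes : List String) (to_nodes : List String) (from_inputs : List String) (load_versions : List (String × String)) (pipeline_name : String), Dom_generate_kedro_command_py tags node_names from_nodes to_nodes from_inputs load_versions pipeline_name → Spec_generate_kedro_command_py tags node_names from_nodes to_nodes from_inputs load_versions pipeline_name (generate_kedro_command_py tags node_names from_nodes to_nodes from_inputs load_versions pipeline_name)

-- ===== LEMMAS AND PROOFS =====

-- proof-only helper: the suffix a space-join contributes after its first element
def pvSuf : List String → String
  | [] => ""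
  | t :: l => " " ++ t ++ pvSuf l

theorem pvJoin_space (l : List String) (a : String) :
    PySem.Str.join " " (a :: l) = a ++ pvSuf l := by
  induction l generalizing a with
  | nil =>
      apply String.toList_inj.mp
      simp [PySem.Str.join, PySem.Chars.join_singleton, pvSuf]
  | cons b l ih =>
      apply String.toList_inj.mp
      have h1 : (PySem.Str.join " " (a :: b :: l)).toList
          = a.toList ++ [' '] ++ (PySem.Str.join " " (b :: l)).toList := by
        simp [PySem.Str.join]
        rw [PySem.Chars.join_cons_cons]
        simp [List.append_assoc]
      rw [h1, ih b]
      simp [pvSuf, List.append_assoc]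

theorem pvJoin_one (sep a : String) : PySem.Str.join sep [a] = a := by
  apply String.toList_inj.mp
  simp [PySem.Str.join, PySem.Chars.join_singleton]

-- ===== VERDICT =====
set_option maxHeartbeats 4000000 in
theorem generate_kedro_command_py_spec : Claim_equal_generate_kedro_command_py := by
  intro tags node_names from_nodes to_nodes from_inputs load_versions pipeline_name _
  unfold Spec_generate_kedro_command_py
  by_cases h1 : from_inputs.isEmpty <;> by_cases h2 : from_nodes.isEmpty <;>
    by_cases h3 : to_nodes.isEmpty <;> by_cases h4 : node_names.isEmpty <;>
    by_cases h5 : pipeline_name.isEmpty <;> by_cases h6 : tags.isEmpty <;>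
    by_cases h7 : load_versions.isEmpty <;>
    (apply String.toList_inj.mp;
     simp [generate_kedro_command_py, generate_kedro_command_py_alt, pvRenderOpts,
           pvJoin_space, pvJoin_one, pvSuf, h1, h2, h3, h4, h5, h6, h7])
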